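-- pv_equiv track=rewrite | github.com/kangli914/pycharm | dicts/pw_16_even-old-dict.py | dict_reform
-- ===== SOURCE A (Python) =====
-- def dict_reform(orig_dict):
--     """Given a tuple it takes even-indexed arguments become the dict keys while the odd-numbered arguments become the dict values."""
--     output = dict()
--
--     key = None
--     for idx, item in enumerate(orig_dict):
--         if not idx % 2:
--             output.setdefault(item, None)
--             key = item
--         else:
--             output[key] = item
--     return output
-- ===== SOURCE B (Python) =====
-- def dict_reform(orig_dict):
--     """Given a tuple it takes even-indexed arguments become the dict keys while the odd-numbered arguments become the dict values."""
--     result = dict(zip(orig_dict[::2], orig_dict[1::2]))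
--     if len(orig_dict) % 2:
--         result.setdefault(orig_dict[-1], None)
--     return result
-- ===== Notes on version B (the rewrite author's own statement) =====
-- stated objective: simpler
-- what changed: Replaces A's single stateful pass (parity branching on the index with a carried 'key' variable) by slicing the even- and odd-indexed subsequences and building the dict with dict(zip(keys, values)), plus one setdefault for an odd trailing key.
import Mathlib
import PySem

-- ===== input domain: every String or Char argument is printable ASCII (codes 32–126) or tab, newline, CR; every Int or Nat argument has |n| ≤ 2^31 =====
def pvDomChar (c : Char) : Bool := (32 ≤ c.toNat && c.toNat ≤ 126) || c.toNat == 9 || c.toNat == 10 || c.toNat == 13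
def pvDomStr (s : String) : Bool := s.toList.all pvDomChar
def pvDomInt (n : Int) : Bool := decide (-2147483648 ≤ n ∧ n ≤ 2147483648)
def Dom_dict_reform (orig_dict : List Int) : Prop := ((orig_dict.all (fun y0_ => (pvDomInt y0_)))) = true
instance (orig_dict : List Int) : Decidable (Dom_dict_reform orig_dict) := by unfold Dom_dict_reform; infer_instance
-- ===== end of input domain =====

-- B replaces A's stateful parity-branching enumerate loop by zipping the two step-2 slices
-- (dict(zip(xs[::2], xs[1::2])), plus setdefault for an odd trailing key); objective: simpler, same cost.

-- ===== PORT A =====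
-- A's loop body, with state (output, key); key = None at an odd index is unreachable (index 0 is even)
def stepA (st : PySem.Dict Int (Option Int) × Option Int) (p : Int × Int) :
    PySem.Dict Int (Option Int) × Option Int :=
  if p.1 % 2 == 0 then (st.1.setdefault p.2 none, some p.2)
  else
    match st.2 with
    | some k => (st.1.insert k (some p.2), st.2)
    | none => (st.1, st.2)

def dict_reform (orig_dict : List Int) : List (Int × Option Int) :=
  let st := (PySem.List.enumerate orig_dict).foldl stepA (PySem.Dict.empty, none)
  st.1.items

-- ===== PORT B =====
-- one zipped pair inserted into the dict being built
def insB (d : PySem.Dict Int (Option Int)) (p : Int × Int) : PySem.Dict Int (Option Int) :=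
  d.insert p.1 (some p.2)

def dict_reform_alt (orig_dict : List Int) : List (Int × Option Int) :=
  let keys := (PySem.List.slice? orig_dict none none 2).getD []       -- orig_dict[::2]; step 2 ≠ 0: always some
  let values := (PySem.List.slice? orig_dict (some 1) none 2).getD [] -- orig_dict[1::2]
  let result := (keys.zip values).foldl insB PySem.Dict.empty          -- dict(zip(keys, values))
  let result :=
    if orig_dict.length % 2 == 1 then
      -- result.setdefault(orig_dict[-1], None); the list is nonempty here, so pyGet? is some
      match PySem.List.pyGet? orig_dict (-1) with
      | some k => result.setdefault k none
      | none => result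
    else result
  result.items

-- ===== PRECONDITION & SPEC =====
def Spec_dict_reform (orig_dict : List Int) (out : List (Int × Option Int)) : Prop := out = dict_reform_alt orig_dict
instance (orig_dict : List Int) (out : List (Int × Option Int)) : Decidable (Spec_dict_reform orig_dict out) := by unfold Spec_dict_reform; infer_instance

-- ===== CLAIM (what is proved, stated in full; the proofs are below) =====
def Claim_equal_dict_reform : Prop := ∀ (orig_dict : List Int), Dom_dict_reform orig_dict → Spec_dict_reform orig_dict (dict_reform orig_dict)

-- ===== LEMMAS AND PROOFS =====

-- common recursive characterisation: insert consecutive pairs, setdefault an odd trailing key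
def pairsIns (d : PySem.Dict Int (Option Int)) : List Int → PySem.Dict Int (Option Int)
  | [] => d
  | [k] => d.setdefault k none
  | k :: v :: t => pairsIns (d.insert k (some v)) t

mutual
def evensL : List Int → List Int
  | [] => []
  | x :: t => x :: oddsL t
def oddsL : List Int → List Int
  | [] => []
  | _ :: t => evensL t
end

lemma oddsL_eq_tail (xs : List Int) : oddsL xs = evensL xs.tail := by
  cases xs <;> simp [oddsL, evensL]

lemma filterMap_range_even : ∀ (xs : List Int),
    List.filterMap (fun k : Nat => xs[2 * k]?) (List.range ((xs.length + 1) / 2)) = evensL xs := by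
  intro xs
  generalize hn : xs.length = n
  induction n using Nat.strong_induction_on generalizing xs with
  | _ n ih =>
  match xs, hn with
  | [], hn => subst hn; simp [evensL]
  | [x], hn => subst hn; simp [evensL, oddsL]
  | x :: y :: t', hn =>
      subst hn
      have hlen : ((x :: y :: t').length + 1) / 2 = (t'.length + 1) / 2 + 1 := by
        simp [List.length_cons]; omega
      rw [hlen, List.range_succ_eq_map, List.filterMap_cons, List.filterMap_map]
      simp only [mul_zero, List.getElem?_cons_zero]
      have heq : List.filterMap ((fun k : Nat => (x :: y :: t')[2 * k]?) ∘ Nat.succ) (List.range ((t'.length + 1) / 2))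
          = List.filterMap (fun k : Nat => t'[2*k]?) (List.range ((t'.length + 1) / 2)) := by
        apply List.filterMap_congr
        intro k _
        have h2 : 2 * Nat.succ k = (2 * k) + 1 + 1 := by omega
        simp [Function.comp, h2]
      rw [heq, ih t'.length (by omega) t' rfl]
      simp [evensL, oddsL_eq_tail]

lemma slice?_evens (xs : List Int) : PySem.List.slice? xs none none 2 = some (evensL xs) := by
  simp only [PySem.List.slice?, PySem.List.sliceIndices]
  norm_num
  have hc : (if 0 < xs.length then (((xs.length : Int) + 2 - 1) / 2).toNat else 0) = (xs.length+1)/2 := by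
    split <;> omega
  have hf : ∀ k : Nat, xs[(2 * (k:Int)).toNat]? = xs[2*k]? := by intro k; congr 1
  rw [hc]; simp only [hf]; exact filterMap_range_even xs

lemma slice?_odds (xs : List Int) : PySem.List.slice? xs (some 1) none 2 = some (oddsL xs) := by
  cases xs with
  | nil => rfl
  | cons x t =>
    simp only [PySem.List.slice?, PySem.List.sliceIndices]
    norm_num
    have hc : (if 0 < t.length then (((t.length : Int) + 2 - 1) / 2).toNat else 0)
        = (t.length + 1) / 2 := by split <;> omega
    rw [hc]
    have hf : ∀ k : Nat, (x :: t)[((1:Int) + 2 * (k:Int)).toNat]? = t[2 * k]? := by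
      intro k
      have h1 : ((1:Int) + 2 * (k:Int)).toNat = 2 * k + 1 := by omega
      rw [h1]; simp
    simp only [hf]
    rw [filterMap_range_even t]
    simp [oddsL]

lemma sd_insert (d : PySem.Dict Int (Option Int)) (k : Int) (w : Option Int) :
    (d.setdefault k none).insert k w = d.insert k w := by
  by_cases h : d.contains k = true
  · rw [PySem.Dict.setdefault_of_contains d none h]
  · have h' : d.contains k = false := by simpa using h
    rw [PySem.Dict.setdefault_of_not_contains d none h']
    apply PySem.Dict.ext
    rw [PySem.Dict.items_insert_of_contains _ w (PySem.Dict.contains_insert_self d k none),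
        PySem.Dict.items_insert_of_not_contains d none h',
        PySem.Dict.items_insert_of_not_contains d w h',
        List.map_append]
    have hmap : d.items.map (fun p => if (p.1 == k) = true then (k, w) else p) = d.items.map id := by
      apply List.map_congr_left
      intro p hp
      have hk : p.1 ∈ d.keys := by
        simp only [PySem.Dict.keys]; exact List.mem_map_of_mem hp
      have hcont := (PySem.Dict.contains_iff_mem_keys d p.1).mpr hk
      have hne : (p.1 == k) = false := by
        by_contra hb
        have : p.1 = k := by
          have : (p.1 == k) = true := by simpa using hb
          exact of_decide_eq_true this
        rw [this] at hcont; rw [hcont] at h'; cases h'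
      simp [hne]
    rw [hmap, List.map_id]
    simp

lemma loopA (d : PySem.Dict Int (Option Int)) (xs : List Int) :
    ∀ (i : Int), i % 2 = 0 → ∀ (key : Option Int),
      ((PySem.List.enumerate xs i).foldl stepA (d, key)).1 = pairsIns d xs := by
  induction d, xs using pairsIns.induct with
  | case1 d => intro i hi key; simp [PySem.List.enumerate_nil, pairsIns]
  | case2 d k =>
    intro i hi key
    rw [PySem.List.enumerate_cons, PySem.List.enumerate_nil]
    have he : (i % 2 == 0) = true := by simp [hi]
    simp [stepA, he, pairsIns]
  | case3 d k v t ih =>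
    intro i hi key
    rw [PySem.List.enumerate_cons, PySem.List.enumerate_cons]
    have he : (i % 2 == 0) = true := by simp [hi]
    have ho : ((i + 1) % 2 == 0) = false := by
      simp only [beq_eq_false_iff_ne]; omega
    simp only [List.foldl_cons, stepA, he, ho, if_true]
    rw [sd_insert]
    have hi2 : (i + 1 + 1) % 2 = 0 := by omega
    exact (ih (i + 1 + 1) hi2 (some k)).trans rfl

lemma mainB (d : PySem.Dict Int (Option Int)) (xs : List Int) :
    (if xs.length % 2 == 1 then
      match PySem.List.pyGet? xs (-1) with
      | some k => (((evensL xs).zip (oddsL xs)).foldl insB d).setdefault k none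
      | none => ((evensL xs).zip (oddsL xs)).foldl insB d
     else ((evensL xs).zip (oddsL xs)).foldl insB d) = pairsIns d xs := by
  induction d, xs using pairsIns.induct with
  | case1 d => simp [evensL, oddsL, pairsIns]
  | case2 d k =>
    simp [evensL, oddsL, pairsIns, PySem.List.pyGet?_neg_one]
  | case3 d k v t ih =>
    have hev : evensL (k :: v :: t) = k :: evensL t := by simp [evensL, oddsL]
    have hod : oddsL (k :: v :: t) = v :: oddsL t := by simp [evensL, oddsL]
    rw [hev, hod]
    have hlen : ((k :: v :: t).length % 2 == 1) = (t.length % 2 == 1) := by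
      simp only [List.length_cons]; congr 1; omega
    rw [hlen]
    have hzip : ((k :: evensL t).zip (v :: oddsL t)).foldl insB d
        = ((evensL t).zip (oddsL t)).foldl insB (d.insert k (some v)) := by
      simp [insB]
    by_cases hodd : (t.length % 2 == 1) = true
    · rw [hodd]
      have ht : t ≠ [] := by
        intro h; subst h; simp at hodd
      have hlast : PySem.List.pyGet? (k :: v :: t) (-1) = PySem.List.pyGet? t (-1) := by
        rw [PySem.List.pyGet?_neg_one, PySem.List.pyGet?_neg_one]
        rw [List.getLast?_cons_cons]
        cases t with
        | nil => cases ht rfl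
        | cons w t2 => rw [List.getLast?_cons_cons]
      rw [hlast, hzip]
      rw [hodd] at ih
      simpa [pairsIns] using ih
    · have hodd' : (t.length % 2 == 1) = false := by simpa using hodd
      rw [hodd', hzip]
      rw [hodd'] at ih
      simpa [pairsIns] using ih

-- ===== VERDICT (by name: the statement is the Claim_ definition above) =====
theorem dict_reform_spec : Claim_equal_dict_reform := by
  intro xs _
  unfold Spec_dict_reform dict_reform dict_reform_alt
  simp only [slice?_evens, slice?_odds, Option.getD_some]
  rw [loopA PySem.Dict.empty xs 0 rfl none, mainB PySem.Dict.empty xs]
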